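-- pv_equiv track=rewrite | github.com/YelKar/test_project | exam/tasks/test.py | f
-- ===== SOURCE A (Python) =====
-- def f(n: int):
--     prev = 0
--     c = 0
--     while n:
--         curr = (n % 8) % 2
--         c += (n % 8) % 2
--         if prev == curr == 1 or c > 3:
--             return False
--         prev = curr
--         n //= 8
--     return c == 3
-- ===== SOURCE B (Python) =====
-- def f(n):
--     # Negative numbers never have the pattern (A returns False on them too).
--     if n < 0:
--         return False
--     # Build the list of octal-digit parities (low to high), then two passes:
--     # count of odd digits must be 3 and no two adjacent octal digits both odd.
--     p = []
--     while n:
--         p.append(n % 8 % 2)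
--         n //= 8
--     return sum(p) == 3 and not any(a and b for a, b in zip(p, p[1:]))
-- ===== Notes on version B (the rewrite author's own statement) =====
-- stated objective: simpler
-- what changed: A's single stateful scan with early exits (prev/c running state) is replaced by a negative guard plus building the list of octal-digit parities once and two plain passes: sum == 3 and no adjacent pair of odd digits.
import Mathlib
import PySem

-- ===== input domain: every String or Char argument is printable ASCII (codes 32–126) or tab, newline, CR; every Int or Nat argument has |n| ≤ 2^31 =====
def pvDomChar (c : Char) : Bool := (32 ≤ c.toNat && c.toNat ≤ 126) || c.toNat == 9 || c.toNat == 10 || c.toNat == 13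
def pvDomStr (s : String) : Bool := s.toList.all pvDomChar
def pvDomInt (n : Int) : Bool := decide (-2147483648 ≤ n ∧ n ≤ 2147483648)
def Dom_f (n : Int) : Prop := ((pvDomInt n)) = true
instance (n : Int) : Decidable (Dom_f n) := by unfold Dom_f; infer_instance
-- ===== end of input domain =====

-- B builds the octal-digit parity list once, then checks sum == 3 and no adjacent odd pair;
-- A keeps running state (prev, c) in a single scan with early exits.

-- ===== PORT A =====
-- A's while loop; fuel is only a totality guard (for n ≥ 0 the loop runs < fuel times).
def fLoopA (prev c n : Int) (fuel : Nat) : Bool :=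
  match fuel with
  | 0 => false
  | fuel + 1 =>
    if n = 0 then decide (c = 3)
    else
      let curr := PySem.Int.mod (PySem.Int.mod n 8) 2
      let c' := c + curr
      if (prev == 1 && curr == 1) || c' > 3 then false
      else fLoopA curr c' (PySem.Int.floordiv n 8) fuel

def f (n : Int) : Bool := fLoopA 0 0 n (n.natAbs + 1)

-- ===== PORT B =====
-- B's while loop building the parity list (low digit first); fuel is only a totality guard.
def parList (n : Int) (fuel : Nat) : List Int :=
  match fuel with
  | 0 => []
  | fuel + 1 =>
    if n = 0 then []
    else PySem.Int.mod (PySem.Int.mod n 8) 2 :: parList (PySem.Int.floordiv n 8) fuel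

def f_alt (n : Int) : Bool :=
  if n < 0 then false
  else
    let p := parList n (n.natAbs + 1)
    decide (p.sum = 3) && !((p.zip p.tail).any fun ab => ab.1 != 0 && ab.2 != 0)

-- ===== PRECONDITION & SPEC =====
def Spec_f (n : Int) (out : Bool) : Prop := out = f_alt n
instance (n : Int) (out : Bool) : Decidable (Spec_f n out) := by unfold Spec_f; infer_instance

-- ===== CLAIM (what is proved, stated in full; the proofs are below) =====
def Claim_equal_f : Prop := ∀ (n : Int), Dom_f n → Spec_f n (f n)

-- ===== LEMMAS AND PROOFS =====

-- A's scan expressed over the parity list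
def goodA (prev c : Int) : List Int → Bool
  | [] => decide (c = 3)
  | x :: xs =>
    if (prev == 1 && x == 1) || c + x > 3 then false
    else goodA x (c + x) xs

-- B's adjacency test with the previous element threaded through
def noAdj (prev : Int) : List Int → Bool
  | [] => true
  | x :: xs => !(prev == 1 && x == 1) && noAdj x xs

theorem parList_mem01 (fuel : Nat) : ∀ n x, x ∈ parList n fuel → x = 0 ∨ x = 1 := by
  induction fuel with
  | zero => intro n x h; simp [parList] at h
  | succ k ih =>
    intro n x h
    by_cases hn : n = 0
    · simp [parList, hn] at h
    · simp [parList, hn] at h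
      rcases h with h | h
      · have := PySem.Int.mod_two_eq (PySem.Int.mod n 8)
        omega
      · exact ih _ _ h

theorem sum_nonneg01 : ∀ l : List Int, (∀ x ∈ l, x = 0 ∨ x = 1) → 0 ≤ l.sum := by
  intro l
  induction l with
  | nil => intro _; simp
  | cons x xs ih =>
    intro h
    have hx := h x (by simp)
    have hs := ih (fun y hy => h y (by simp [hy]))
    simp only [List.sum_cons]
    omega

theorem fLoopA_eq_goodA (fuel : Nat) : ∀ n prev c, 0 ≤ n → n.natAbs < fuel →
    fLoopA prev c n fuel = goodA prev c (parList n fuel) := by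
  induction fuel with
  | zero => intro n prev c _ h; omega
  | succ k ih =>
    intro n prev c hn hf
    by_cases h0 : n = 0
    · simp [fLoopA, parList, goodA, h0]
    · have hpos : 1 ≤ n := by omega
      have h1 : 0 ≤ n / 8 := Int.ediv_nonneg hn (by omega)
      have h2 : n / 8 < n := by omega
      have hlt : (n / 8).natAbs < k := by omega
      simp [fLoopA, parList, h0, ih (n / 8) _ _ h1 hlt, goodA]

theorem goodA_eq (p : List Int) : ∀ prev c, (∀ x ∈ p, x = 0 ∨ x = 1) → 0 ≤ c →
    goodA prev c p = (decide (c + p.sum = 3) && noAdj prev p) := by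
  induction p with
  | nil => intro prev c _ _; simp [goodA, noAdj]
  | cons x xs ih =>
    intro prev c hmem hc
    have hx : x = 0 ∨ x = 1 := hmem x (by simp)
    have hsum : 0 ≤ xs.sum := sum_nonneg01 xs (fun y hy => hmem y (by simp [hy]))
    simp only [goodA, noAdj, List.sum_cons]
    by_cases hadj : (prev == 1 && x == 1) = true
    · simp [hadj]
    · simp only [hadj, Bool.false_or, Bool.not_false, Bool.true_and]
      by_cases hc3 : c + x > 3
      · have : ¬ (c + (x + xs.sum) = 3) := by omega
        simp [hc3, this]
      · simp only [hc3, decide_false]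
        rw [ih x (c + x) (fun y hy => hmem y (by simp [hy])) (by omega)]
        have h2 : c + x + xs.sum = c + (x + xs.sum) := by ring
        rw [h2, if_neg (by simp)]
        rfl

theorem noAdj_eq_zip (p : List Int) : ∀ prev, (∀ x ∈ p, x = 0 ∨ x = 1) → (prev = 0 ∨ prev = 1) →
    ((prev == 1 && (p.headD 0) == 1) || (p.zip p.tail).any fun ab => ab.1 != 0 && ab.2 != 0)
      = !(noAdj prev p) := by
  induction p with
  | nil => intro prev _ _; simp [noAdj]
  | cons x xs ih =>
    intro prev hmem hprev
    have hx : x = 0 ∨ x = 1 := hmem x (by simp)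
    have hz : (x :: xs).zip xs = match xs with
      | [] => []
      | y :: ys => (x, y) :: (y :: ys).zip ys := by cases xs <;> rfl
    cases xs with
    | nil => simp [noAdj]
    | cons y ys =>
      have hy : y = 0 ∨ y = 1 := hmem y (by simp)
      have ihy := ih x (fun z hz => hmem z (by simp [hz])) hx
      simp only [noAdj, List.tail_cons, hz, List.any_cons, List.headD] at *
      have hxy : (x != 0 && y != 0) = (x == 1 && y == 1) := by
        rcases hx with h | h <;> rcases hy with h' | h' <;> simp [h, h']
      rw [hxy]
      cases hA : (x == 1 && y == 1) <;> cases hP : (prev == 1 && x == 1) <;> simp_all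

-- On negative n the loop never reaches 0 (n // 8 stays negative), so A's scan always answers false.
theorem fLoopA_neg (fuel : Nat) : ∀ n prev c, n < 0 → fLoopA prev c n fuel = false := by
  induction fuel with
  | zero => intro n prev c _; rfl
  | succ k ih =>
    intro n prev c hn
    have h0 : ¬ n = 0 := by omega
    have hneg : n / 8 < 0 := by omega
    simp [fLoopA, h0]
    intro _ _
    exact ih (n / 8) _ _ hneg

-- ===== VERDICT (by name: the statement is the Claim_ definition above) =====
theorem f_spec : Claim_equal_f := by
  intro n _
  unfold Spec_f f f_alt
  by_cases hn : n < 0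
  · simp [hn, fLoopA_neg _ n 0 0 hn]
  have hn : 0 ≤ n := by omega
  simp only [if_neg (by omega : ¬ n < 0)]
  rw [fLoopA_eq_goodA (n.natAbs + 1) n 0 0 hn (by omega)]
  set p := parList n (n.natAbs + 1) with hp
  have hmem : ∀ x ∈ p, x = 0 ∨ x = 1 := parList_mem01 _ n
  rw [goodA_eq p 0 0 hmem le_rfl]
  have h := noAdj_eq_zip p 0 hmem (Or.inl rfl)
  simp only [show ((0 : Int) == 1) = false from rfl, Bool.false_and, Bool.false_or] at h
  simp only [zero_add, h, Bool.not_not]
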